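-- pv_equiv track=rewrite | github.com/DmitryNikolskiy/Python_seminars | seminar_005/005-02.py | nextmax
-- ===== SOURCE A (Python) =====
-- def nextmax(f_list):
--     max = f_list[0]
--     res = [f_list[0]]
--     for i in range(len(f_list)):
--         if f_list[i] > max:
--             max = f_list[i]
--             res.append(max)
--     if len(res) == 1:                          # условие если сначала максимальное и оно одно
--         res = nextmax(f_list[1:])              # убираем и считаем дальше
--     return res
-- ===== SOURCE B (Python) =====
-- def nextmax(f_list):
--     # Backward suffix-max pass finds s = first index with f_list[s] < max(f_list[s+1:]);
--     # a single forward pass from s collects the strictly increasing running maxima.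
--     suff = None
--     s = -1
--     for i in range(len(f_list) - 1, -1, -1):
--         x = f_list[i]
--         if suff is not None and x < suff:
--             s = i
--         if suff is None or x > suff:
--             suff = x
--     if s < 0:
--         return []
--     res = []
--     m = None
--     for x in f_list[s:]:
--         if m is None or x > m:
--             m = x
--             res.append(x)
--     return res
-- ===== Notes on version B (the rewrite author's own statement) =====
-- stated objective: alternative
-- what changed: Replaces A's strip-one-head-and-recurse (re-scanning and slicing the list at each recursion level) with one backward suffix-max pass that finds the start index and one forward pass that collects the strict running maxima.
import Mathlib
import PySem

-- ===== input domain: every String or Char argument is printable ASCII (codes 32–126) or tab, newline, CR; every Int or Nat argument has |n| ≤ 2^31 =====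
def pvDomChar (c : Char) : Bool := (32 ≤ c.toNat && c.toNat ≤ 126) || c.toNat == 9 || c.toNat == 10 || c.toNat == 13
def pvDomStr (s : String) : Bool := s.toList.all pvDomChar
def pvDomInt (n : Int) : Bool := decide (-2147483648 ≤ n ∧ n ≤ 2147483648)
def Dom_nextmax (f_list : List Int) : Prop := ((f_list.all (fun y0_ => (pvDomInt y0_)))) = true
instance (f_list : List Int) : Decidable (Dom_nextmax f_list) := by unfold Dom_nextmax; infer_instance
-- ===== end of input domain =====

-- B replaces A's strip-one-head-and-recurse scheme with one backward suffix-max pass to find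
-- the start index and one forward record pass (objective: alternative); return-value equivalence only.

-- ===== PORT A =====
-- A's for-loop over range(len(f_list)) comparing f_list[i] to the running max,
-- ported as a foldl over the same elements with state (max, res).
def nextmaxStep (st : Int × List Int) (v : Int) : Int × List Int :=
  if v > st.1 then (v, st.2 ++ [v]) else st

def nextmax : List Int → List Int
  | [] => []           -- Python raises IndexError (f_list[0]) here; excluded by Pre_
  | x :: xs =>
    let st := (x :: xs).foldl nextmaxStep (x, [x])
    if st.2.length == 1 then nextmax xs else st.2

-- ===== PORT B =====
-- Source B's backward index loop, transcribed structurally from the right; the running suffix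
-- max `suff` is carried as is, and the start index s is carried as the suffix f_list[s:]
-- (exactly what s is used for in Source B's final slice).
def findStartSuffix : List Int → Option Int × Option (List Int)
  | [] => (none, none)
  | x :: xs =>
    let p := findStartSuffix xs
    let st' : Option (List Int) :=
      match p.1 with
      | some b => if x < b then some (x :: xs) else p.2
      | none => p.2
    let suff' : Option Int :=
      match p.1 with
      | some b => if x > b then some x else some b
      | none => some x
    (suff', st')

-- Source B's forward record loop (m starts as None)
def recordsFrom : List Int → Option Int → List Int
  | [], _ => []
  | x :: xs, none => x :: recordsFrom xs (some x)
  | x :: xs, some m => if x > m then x :: recordsFrom xs (some x) else recordsFrom xs (some m)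

def nextmax_alt (f_list : List Int) : List Int :=
  match (findStartSuffix f_list).2 with
  | none => []            -- Source B: s < 0, return []
  | some suf => recordsFrom suf none

-- ===== PRECONDITION & SPEC =====
-- Pre_ excludes exactly the nonincreasing lists (incl. empty/singleton), on which A's
-- recursion reaches the empty list and raises IndexError.
def Pre_nextmax (f_list : List Int) : Prop := ¬ f_list.Pairwise (· ≥ ·)
instance (f_list : List Int) : Decidable (Pre_nextmax f_list) := by unfold Pre_nextmax; infer_instance
def pvWitness_nextmax : List Int := [1, 2]

def Spec_nextmax (f_list : List Int) (out : List Int) : Prop := out = nextmax_alt f_list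
instance (f_list : List Int) (out : List Int) : Decidable (Spec_nextmax f_list out) := by unfold Spec_nextmax; infer_instance

-- ===== CLAIM (what is proved, stated in full; the proofs are below) =====
def Claim_equal_nextmax : Prop := ∀ (f_list : List Int), Dom_nextmax f_list → Pre_nextmax f_list → Spec_nextmax f_list (nextmax f_list)

-- ===== LEMMAS AND PROOFS =====

/-- Running max of A's fold. -/
def maxAcc : Int → List Int → Int
  | m, [] => m
  | m, v :: vs => if v > m then maxAcc v vs else maxAcc m vs

theorem foldA (l : List Int) (m : Int) (acc : List Int) :
    l.foldl nextmaxStep (m, acc) = (maxAcc m l, acc ++ recordsFrom l (some m)) := by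
  induction l generalizing m acc with
  | nil => simp [maxAcc, recordsFrom]
  | cons v vs ih =>
    by_cases h : v > m <;>
      simp [List.foldl, nextmaxStep, h, maxAcc, recordsFrom, ih]

theorem nextmax_cons (x : Int) (xs : List Int) :
    nextmax (x :: xs) =
      if recordsFrom xs (some x) = [] then nextmax xs else x :: recordsFrom xs (some x) := by
  have h0 : (x :: xs).foldl nextmaxStep (x, [x]) = (maxAcc x xs, [x] ++ recordsFrom xs (some x)) := by
    have : nextmaxStep (x, [x]) x = (x, [x]) := by simp [nextmaxStep]
    simp [List.foldl, this, foldA]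
  show (if (((x :: xs).foldl nextmaxStep (x, [x])).2.length == 1) = true then nextmax xs
        else ((x :: xs).foldl nextmaxStep (x, [x])).2) = _
  rw [h0]
  by_cases h : recordsFrom xs (some x) = [] <;> simp [h]

theorem records_nil_iff (l : List Int) (m : Int) :
    recordsFrom l (some m) = [] ↔ ∀ v ∈ l, v ≤ m := by
  induction l generalizing m with
  | nil => simp [recordsFrom]
  | cons v vs ih =>
    by_cases h : v > m
    · simp [recordsFrom, h]
    · simp only [recordsFrom, if_neg h, ih, List.mem_cons]
      constructor
      · intro hall v hv
        rcases hv with rfl | hv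
        · omega
        · exact hall v hv
      · intro hall v hv
        exact hall v (Or.inr hv)

theorem find_fst (l : List Int) (h : l ≠ []) :
    ∃ b, (findStartSuffix l).1 = some b ∧ b ∈ l ∧ ∀ v ∈ l, v ≤ b := by
  induction l with
  | nil => exact absurd rfl h
  | cons x xs ih =>
    by_cases hx : xs = []
    · subst hx
      exact ⟨x, rfl, by simp, by simp⟩
    · obtain ⟨b, hb, hmem, hmax⟩ := ih hx
      by_cases hgt : x > b
      · refine ⟨x, ?_, by simp, ?_⟩
        · simp [findStartSuffix, hb, hgt]
        · intro v hv
          rcases List.mem_cons.1 hv with rfl | hv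
          · exact le_refl _
          · exact le_trans (hmax v hv) (by omega)
      · refine ⟨b, ?_, List.mem_cons_of_mem _ hmem, ?_⟩
        · simp [findStartSuffix, hb, hgt]
        · intro v hv
          rcases List.mem_cons.1 hv with rfl | hv
          · omega
          · exact hmax v hv

theorem main_eq (l : List Int) : nextmax l = nextmax_alt l := by
  induction l with
  | nil => rfl
  | cons x xs ih =>
    rw [nextmax_cons]
    by_cases hx : xs = []
    · subst hx
      simp [nextmax_alt, findStartSuffix, recordsFrom, nextmax]
    · obtain ⟨b, hb, hmem, hmax⟩ := find_fst xs hx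
      by_cases hlt : x < b
      · have hne : recordsFrom xs (some x) ≠ [] := by
          intro hnil
          have hall := (records_nil_iff xs x).1 hnil
          exact absurd (hall b hmem) (by omega)
        rw [if_neg hne]
        show _ = nextmax_alt (x :: xs)
        have h2 : (findStartSuffix (x :: xs)).2 = some (x :: xs) := by
          simp [findStartSuffix, hb, hlt]
        simp [nextmax_alt, h2, recordsFrom]
      · have hnil : recordsFrom xs (some x) = [] := by
          rw [records_nil_iff]
          intro v hv
          exact le_trans (hmax v hv) (by omega)
        rw [if_pos hnil, ih]
        have h2 : (findStartSuffix (x :: xs)).2 = (findStartSuffix xs).2 := by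
          simp [findStartSuffix, hb, hlt]
        simp [nextmax_alt, h2]

-- ===== VERDICT (by name: the statement is the Claim_ definition above) =====
theorem nextmax_spec : Claim_equal_nextmax := by
  intro l _ _
  show nextmax l = nextmax_alt l
  exact main_eq l
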